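-- pv_equiv track=rewrite | github.com/maqp/tfc | src/common/utils/encoding.py | encode_base26
-- ===== SOURCE A (Python) =====
-- def encode_base26(index: int) -> str:
--     """Encode a zero-based integer using lowercase base26 letters."""
--     if index < 0:
--         raise ValueError('Base26 index must be non-negative.')
--
--     result = ''
--     value  = index
--     while True:
--         value, remainder = divmod(value, 26)
--         result = chr(ord('a') + remainder) + result
--         if value == 0:
--             return result
--         value -= 1
-- ===== SOURCE B (Python) =====
-- def encode_base26(index: int) -> str:
--     """Encode a zero-based integer using lowercase base26 letters."""
--     if index < 0:
--         raise ValueError('Base26 index must be non-negative.')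
--
--     quotient, remainder = divmod(index, 26)
--     letter = chr(ord('a') + remainder)
--     if quotient == 0:
--         return letter
--     return encode_base26(quotient - 1) + letter
-- ===== Notes on version B (the rewrite author's own statement) =====
-- stated objective: simpler
-- what changed: Replaced the iterative while-loop with string-prepend accumulator by a direct recursion on the quotient (recurse on q-1, append the letter), removing the mutable state entirely.
import Mathlib
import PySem

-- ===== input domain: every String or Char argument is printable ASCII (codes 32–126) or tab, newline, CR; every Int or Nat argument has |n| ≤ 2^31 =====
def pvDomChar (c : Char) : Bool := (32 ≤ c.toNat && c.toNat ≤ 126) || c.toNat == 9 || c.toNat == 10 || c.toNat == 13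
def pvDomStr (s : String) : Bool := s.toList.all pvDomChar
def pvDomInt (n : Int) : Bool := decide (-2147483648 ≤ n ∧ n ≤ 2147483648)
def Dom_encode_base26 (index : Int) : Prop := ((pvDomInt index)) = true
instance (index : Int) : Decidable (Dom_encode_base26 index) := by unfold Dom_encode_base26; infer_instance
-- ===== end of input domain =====

-- B replaces A's while-loop with prepend-accumulator by a direct recursion on the quotient (simpler; same cost).

-- ===== PORT A =====
-- A's while-loop: state (value, result); each step divmod, prepend letter, stop when quotient is 0.
-- The 'q ≤ 0' test (instead of Python's 'q == 0') is a totality guard only: with the negative-index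
-- guard at the top, value ≥ 0 throughout and q ≥ 0, so it coincides with 'q == 0'.
def encode_base26_loop (value : Int) (result : String) : String :=
  let q := PySem.Int.floordiv value 26
  let r := PySem.Int.mod value 26
  let result' := String.mk [Char.ofNat (97 + r.toNat)] ++ result
  if q ≤ 0 then result'
  else encode_base26_loop (q - 1) result'
termination_by value.toNat
decreasing_by
  rename_i h
  have h26 : (0:Int) < 26 := by norm_num
  have h1 : (1:Int) ≤ PySem.Int.floordiv value 26 := by omega
  have hv : (1:Int) * 26 ≤ value := (PySem.Int.le_floordiv_iff_mul_le h26).mp h1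
  have hlt : PySem.Int.floordiv value 26 < value :=
    (PySem.Int.floordiv_lt_iff_lt_mul h26).mpr (by nlinarith)
  omega

-- Python A raises ValueError on index < 0; the port returns "" there (excluded by Pre_).
def encode_base26 (index : Int) : String :=
  if index < 0 then "" else encode_base26_loop index ""

-- ===== PORT B =====
-- Source B: recurse on the quotient: q, r = divmod(index, 26); q == 0 → letter; else encode(q-1) + letter.
-- Negative index raises in Python (excluded by Pre_); the port returns "" there.
def encode_base26_alt (index : Int) : String :=
  if index < 0 then "" else
  let q := PySem.Int.floordiv index 26
  let r := PySem.Int.mod index 26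
  let letter := String.mk [Char.ofNat (97 + r.toNat)]
  if q = 0 then letter else encode_base26_alt (q - 1) ++ letter
termination_by index.toNat
decreasing_by
  rename_i hneg hq
  have h26 : (0:Int) < 26 := by norm_num
  have hq0 : (0:Int) ≤ PySem.Int.floordiv index 26 :=
    (PySem.Int.le_floordiv_iff_mul_le h26).mpr (by omega)
  have h1 : (1:Int) ≤ PySem.Int.floordiv index 26 := by omega
  have hv : (1:Int) * 26 ≤ index := (PySem.Int.le_floordiv_iff_mul_le h26).mp h1
  have hlt : PySem.Int.floordiv index 26 < index :=
    (PySem.Int.floordiv_lt_iff_lt_mul h26).mpr (by nlinarith)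
  omega

-- ===== PRECONDITION & SPEC =====
-- Python A raises ValueError exactly on negative index; both programs return on index ≥ 0.
def Pre_encode_base26 (index : Int) : Prop := 0 ≤ index
instance (index : Int) : Decidable (Pre_encode_base26 index) := by unfold Pre_encode_base26; infer_instance
def pvWitness_encode_base26 : Int := (27)

def Spec_encode_base26 (index : Int) (out : String) : Prop := out = encode_base26_alt index
instance (index : Int) (out : String) : Decidable (Spec_encode_base26 index out) := by unfold Spec_encode_base26; infer_instance

-- ===== CLAIM (what is proved, stated in full; the proofs are below) =====
def Claim_equal_encode_base26 : Prop := ∀ (index : Int), Dom_encode_base26 index → Pre_encode_base26 index → Spec_encode_base26 index (encode_base26 index)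

-- ===== LEMMAS AND PROOFS =====

-- Loop invariant: for nonnegative value, A's loop equals B's recursion with the accumulator appended.
theorem loop_eq_alt_append (n : Nat) (value : Int) (hv : 0 ≤ value) (hn : value.toNat ≤ n)
    (result : String) :
    encode_base26_loop value result = encode_base26_alt value ++ result := by
  induction n generalizing value result with
  | zero =>
    have hval : value = 0 := by omega
    subst hval
    simp [encode_base26_loop, encode_base26_alt, PySem.Int.floordiv, PySem.Int.mod]
  | succ n ih =>
    rw [encode_base26_loop, encode_base26_alt]
    have hfd : PySem.Int.floordiv value 26 = value / 26 :=
      PySem.Int.floordiv_eq_ediv_of_pos (by norm_num)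
    simp only [hfd, if_neg (not_lt.mpr hv)]
    by_cases hq : value / 26 = 0
    · simp [hq]
    · have hq0 : (0:Int) ≤ value / 26 := Int.ediv_nonneg hv (by norm_num)
      have hle : ¬ value / 26 ≤ 0 := by omega
      simp only [if_neg hle, if_neg hq]
      rw [ih (value / 26 - 1) (by omega) (by omega)]
      simp [String.append_assoc]

-- ===== VERDICT (by name: the statement is the Claim_ definition above) =====
theorem encode_base26_spec : Claim_equal_encode_base26 := by
  intro index _ hpre
  have hnn : 0 ≤ index := hpre
  unfold Spec_encode_base26 encode_base26
  rw [if_neg (by omega)]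
  rw [loop_eq_alt_append index.toNat index hnn (le_refl _)]
  simp
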